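-- pv_equiv track=rewrite | github.com/AYamaui/Practice | exercises/word_concatenation.py | categorize_words
-- ===== SOURCE A (Python) =====
-- def categorize_words(words):
--     same_letter_words = {}
--     first_letter_words = {}
--     last_letter_words = {}
--     letters = set()
--
--     for idx, word in enumerate(words):
--
--         first_letter = word[0]
--         last_letter = word[-1]
--         letters.add(first_letter)
--         letters.add(last_letter)
--         first_letter_count = 0
--         last_letter_count = 0
--
--         for letter in word:
--             if letter == first_letter:
--                 first_letter_count += 1
--             else:
--                 break
--
--         for i in range(len(word) - 1, -1, -1):
--             if word[i] == last_letter: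
--                 last_letter_count += 1
--             else:
--                 break
--
--         if first_letter_count == len(word):
--             same_letter_words.setdefault(word[0], [])
--             same_letter_words[word[0]].append((idx, len(word)))
--         else:
--             first_letter_words.setdefault(word[0], [])
--             last_letter_words.setdefault(word[-1], [])
--
--             first_letter_words[word[0]].append((idx, first_letter_count))
--             last_letter_words[word[-1]].append((idx, last_letter_count))
--
--     return letters, first_letter_words, same_letter_words, last_letter_words
-- ===== SOURCE B (Python) =====
-- def _group(pairs):
--     d = {}
--     for k, v in pairs:
--         d.setdefault(k, []).append(v)
--     return d
--
--
-- def categorize_words(words):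
--     # stage 1: one info record per word (index, first, last, length, lead run, trail run)
--     infos = []
--     for idx, word in enumerate(words):
--         first, last, n = word[0], word[-1], len(word)
--         lead = n - len(word.lstrip(first))
--         trail = n - len(word.rstrip(last))
--         infos.append((idx, first, last, n, lead, trail))
--
--     # stage 2: distinct first/last letters in first-seen order
--     letters = set()
--     for _, f, l, _, _, _ in infos:
--         letters.add(f)
--         letters.add(l)
--
--     # stage 3: three independent grouping passes
--     same = _group((f, (i, n)) for i, f, l, n, lead, tr in infos if lead == n)
--     firsts = _group((f, (i, lead)) for i, f, l, n, lead, tr in infos if lead != n)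
--     lasts = _group((l, (i, tr)) for i, f, l, n, lead, tr in infos if lead != n)
--
--     return letters, firsts, same, lasts
-- ===== Notes on version B (the rewrite author's own statement) =====
-- stated objective: alternative
-- what changed: A is one interleaved loop that break-scans each word forwards and backwards and updates the letter set and three dicts in place per iteration; B is a staged pipeline: it first builds one info record per word (lead/trail run lengths read off lstrip/rstrip), then builds the letter set and each of the three dicts in separate grouping passes over the records.
import Mathlib
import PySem

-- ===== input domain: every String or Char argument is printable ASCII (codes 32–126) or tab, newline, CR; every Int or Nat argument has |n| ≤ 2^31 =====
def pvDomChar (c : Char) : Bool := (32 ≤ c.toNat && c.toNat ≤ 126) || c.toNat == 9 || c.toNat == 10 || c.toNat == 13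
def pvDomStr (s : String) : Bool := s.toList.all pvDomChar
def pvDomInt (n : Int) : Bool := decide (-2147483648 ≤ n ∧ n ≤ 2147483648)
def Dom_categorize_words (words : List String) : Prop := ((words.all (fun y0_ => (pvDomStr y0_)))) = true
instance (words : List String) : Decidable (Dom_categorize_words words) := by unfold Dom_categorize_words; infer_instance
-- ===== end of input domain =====

-- B replaces A's single interleaved loop (two directional break-scans per word, four containers
-- updated in one pass) by a staged pipeline: one info record per word via lstrip/rstrip run
-- lengths, then separate passes building the letter set and the three dicts (objective: alternative).

-- ===== PORT A =====
-- the state carried by A's loop: (letters, first_letter_words, same_letter_words, last_letter_words)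
abbrev PVSt := PySem.Set String × PySem.Dict String (List (Int × Int)) × PySem.Dict String (List (Int × Int)) × PySem.Dict String (List (Int × Int))

-- 'for letter in word: if letter == first_letter: count += 1 else: break'
def aLead (c : Char) (acc : Int) : List Char → Int
  | [] => acc
  | x :: xs => if x == c then aLead c (acc + 1) xs else acc

-- 'for i in range(len(word)-1, -1, -1): if word[i] == last_letter: count += 1 else: break'
-- ported as the same break-scan over the reversed characters (exact: the indices len-1 … 0 are in range)
def aTrail (c : Char) (acc : Int) : List Char → Int
  | [] => acc
  | x :: xs => if x == c then aTrail c (acc + 1) xs else acc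

def stepA (st : PVSt) (p : Int × String) : PVSt :=
  let word := p.2
  let fc := (PySem.Str.pyGet? word 0).getD ' '    -- word[0]   (IndexError on "" excluded by Pre_)
  let lc := (PySem.Str.pyGet? word (-1)).getD ' ' -- word[-1]
  let letters := PySem.Set.add (PySem.Set.add st.1 (String.ofList [fc])) (String.ofList [lc])
  let fcount := aLead fc 0 word.toList
  let lcount := aTrail lc 0 word.toList.reverse
  if fcount = (word.toList.length : Int) then
    (letters, st.2.1,
      (st.2.2.1.setdefault (String.ofList [fc]) []).modify (String.ofList [fc]) [] (· ++ [(p.1, (word.toList.length : Int))]),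
      st.2.2.2)
  else
    (letters,
      (st.2.1.setdefault (String.ofList [fc]) []).modify (String.ofList [fc]) [] (· ++ [(p.1, fcount)]),
      st.2.2.1,
      (st.2.2.2.setdefault (String.ofList [lc]) []).modify (String.ofList [lc]) [] (· ++ [(p.1, lcount)]))

def categorize_words (words : List String) : List String × (List (String × List (Int × Int))) × (List (String × List (Int × Int))) × (List (String × List (Int × Int))) :=
  let st := (PySem.List.enumerate words 0).foldl stepA (PySem.Set.empty, PySem.Dict.empty, PySem.Dict.empty, PySem.Dict.empty)
  (st.1, st.2.1.items, st.2.2.1.items, st.2.2.2.items)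

-- ===== PORT B =====
-- one info record per word: (idx, first, last, len, lead run, trail run)
structure BInfo where
  idx : Int
  first : Char
  last : Char
  n : Int
  lead : Int
  trail : Int
  deriving DecidableEq, Repr

-- word.lstrip(first) / word.rstrip(last) with a single-character strip argument:
-- ported by hand as dropWhile on the (reversed) character list — exact for a one-char strip set.
def bInfoOf (p : Int × String) : BInfo :=
  let cs := p.2.toList
  let f := (PySem.Str.pyGet? p.2 0).getD ' '      -- word[0]   (IndexError on "" excluded by Pre_)
  let l := (PySem.Str.pyGet? p.2 (-1)).getD ' '   -- word[-1]
  { idx := p.1, first := f, last := l, n := (cs.length : Int),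
    lead := (cs.length : Int) - ((cs.dropWhile (· == f)).length : Int),
    trail := (cs.length : Int) - (((cs.reverse.dropWhile (· == l)).reverse).length : Int) }

-- _group: 'd.setdefault(k, []).append(v)' over a stream of (key, value) pairs
def bGroup (ps : List (String × (Int × Int))) : PySem.Dict String (List (Int × Int)) :=
  ps.foldl (fun d kv => (d.setdefault kv.1 []).modify kv.1 [] (· ++ [kv.2])) PySem.Dict.empty

def categorize_words_alt (words : List String) : List String × (List (String × List (Int × Int))) × (List (String × List (Int × Int))) × (List (String × List (Int × Int))) :=
  let infos := (PySem.List.enumerate words 0).map bInfoOf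
  let letters := infos.foldl
    (fun s t => PySem.Set.add (PySem.Set.add s (String.ofList [t.first])) (String.ofList [t.last]))
    PySem.Set.empty
  let same := bGroup (infos.filterMap
    (fun t => if t.lead = t.n then some (String.ofList [t.first], (t.idx, t.n)) else none))
  let firsts := bGroup (infos.filterMap
    (fun t => if t.lead ≠ t.n then some (String.ofList [t.first], (t.idx, t.lead)) else none))
  let lasts := bGroup (infos.filterMap
    (fun t => if t.lead ≠ t.n then some (String.ofList [t.last], (t.idx, t.trail)) else none))
  (letters, firsts.items, same.items, lasts.items)

-- ===== PRECONDITION & SPEC =====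
-- Pre_ excludes lists containing an empty word: there Python A raises IndexError at word[0] (B raises too).
def Pre_categorize_words (words : List String) : Prop := ∀ w ∈ words, w ≠ ""
instance (words : List String) : Decidable (Pre_categorize_words words) := by unfold Pre_categorize_words; infer_instance

def pvWitness_categorize_words : List String := ["aab", "bb", "xyx", "c!c"]

def Spec_categorize_words (words : List String) (out : List String × (List (String × List (Int × Int))) × (List (String × List (Int × Int))) × (List (String × List (Int × Int)))) : Prop := out = categorize_words_alt words
instance (words : List String) (out : List String × (List (String × List (Int × Int))) × (List (String × List (Int × Int))) × (List (String × List (Int × Int)))) : Decidable (Spec_categorize_words words out) := by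
  unfold Spec_categorize_words
  exact @instDecidableEqProd _ _ inferInstance (@instDecidableEqProd _ _ inferInstance (@instDecidableEqProd _ _ inferInstance inferInstance)) out (categorize_words_alt words)

-- ===== CLAIM (what is proved, stated in full; the proofs are below) =====
def Claim_equal_categorize_words : Prop := ∀ (words : List String), Dom_categorize_words words → Pre_categorize_words words → Spec_categorize_words words (categorize_words words)

-- ===== LEMMAS AND PROOFS =====

-- A's forward break-scan counts the leading run: aLead c acc l = acc + |takeWhile (== c) l|
theorem aLead_eq_takeWhile (c : Char) (acc : Int) (l : List Char) :
    aLead c acc l = acc + ((l.takeWhile (· == c)).length : Int) := by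
  induction l generalizing acc with
  | nil => simp [aLead]
  | cons x xs ih =>
    by_cases h : x = c
    · simp [aLead, h, ih]; omega
    · simp [aLead, h]

theorem aTrail_eq_takeWhile (c : Char) (acc : Int) (l : List Char) :
    aTrail c acc l = acc + ((l.takeWhile (· == c)).length : Int) := by
  induction l generalizing acc with
  | nil => simp [aTrail]
  | cons x xs ih =>
    by_cases h : x = c
    · simp [aTrail, h, ih]; omega
    · simp [aTrail, h]

-- |takeWhile p l| + |dropWhile p l| = |l|
theorem takeWhile_add_dropWhile_length (p : Char → Bool) (l : List Char) :
    (l.takeWhile p).length + (l.dropWhile p).length = l.length := by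
  conv_rhs => rw [← List.takeWhile_append_dropWhile (p := p) (l := l)]
  rw [List.length_append]

-- A's counts expressed through B's info record (word nonempty)
theorem aLead_eq_info (p : Int × String) :
    aLead (bInfoOf p).first 0 p.2.toList = (bInfoOf p).lead := by
  rw [aLead_eq_takeWhile]
  simp only [bInfoOf]
  have := takeWhile_add_dropWhile_length (· == (bInfoOf p).first) p.2.toList
  simp only [bInfoOf] at this
  omega

theorem aTrail_eq_info (p : Int × String) :
    aTrail (bInfoOf p).last 0 p.2.toList.reverse = (bInfoOf p).trail := by
  rw [aTrail_eq_takeWhile]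
  simp only [bInfoOf, List.length_reverse]
  have := takeWhile_add_dropWhile_length (· == (bInfoOf p).last) p.2.toList.reverse
  simp only [bInfoOf, List.length_reverse] at this
  omega

-- stepA written through B's info record
theorem stepA_eq_info (st : PVSt) (p : Int × String) :
    stepA st p =
      (let t := bInfoOf p
       let letters := PySem.Set.add (PySem.Set.add st.1 (String.ofList [t.first])) (String.ofList [t.last])
       if t.lead = t.n then
         (letters, st.2.1,
           (st.2.2.1.setdefault (String.ofList [t.first]) []).modify (String.ofList [t.first]) [] (· ++ [(t.idx, t.n)]),
           st.2.2.2)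
       else
         (letters,
           (st.2.1.setdefault (String.ofList [t.first]) []).modify (String.ofList [t.first]) [] (· ++ [(t.idx, t.lead)]),
           st.2.2.1,
           (st.2.2.2.setdefault (String.ofList [t.last]) []).modify (String.ofList [t.last]) [] (· ++ [(t.idx, t.trail)]))) := by
  have hf : (bInfoOf p).first = (PySem.Str.pyGet? p.2 0).getD ' ' := rfl
  have hl : (bInfoOf p).last = (PySem.Str.pyGet? p.2 (-1)).getD ' ' := rfl
  have hn : (bInfoOf p).n = (p.2.toList.length : Int) := rfl
  have hi : (bInfoOf p).idx = p.1 := rfl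
  simp only [stepA, ← hf, ← hl, ← hn, ← hi, aLead_eq_info p, aTrail_eq_info p]

-- the staged B pipeline computes exactly the four components of A's interleaved fold
theorem foldA_staged (ps : List (Int × String)) (s0 : PySem.Set String)
    (d1 d2 d3 : PySem.Dict String (List (Int × Int))) :
    ps.foldl stepA (s0, d1, d2, d3) =
      ((ps.map bInfoOf).foldl
        (fun s t => PySem.Set.add (PySem.Set.add s (String.ofList [t.first])) (String.ofList [t.last])) s0,
       ((ps.map bInfoOf).filterMap
        (fun t => if t.lead ≠ t.n then some (String.ofList [t.first], (t.idx, t.lead)) else none)).foldl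
        (fun d kv => (d.setdefault kv.1 []).modify kv.1 [] (· ++ [kv.2])) d1,
       ((ps.map bInfoOf).filterMap
        (fun t => if t.lead = t.n then some (String.ofList [t.first], (t.idx, t.n)) else none)).foldl
        (fun d kv => (d.setdefault kv.1 []).modify kv.1 [] (· ++ [kv.2])) d2,
       ((ps.map bInfoOf).filterMap
        (fun t => if t.lead ≠ t.n then some (String.ofList [t.last], (t.idx, t.trail)) else none)).foldl
        (fun d kv => (d.setdefault kv.1 []).modify kv.1 [] (· ++ [kv.2])) d3) := by
  induction ps generalizing s0 d1 d2 d3 with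
  | nil => simp
  | cons p ps ih =>
    simp only [List.map_cons, List.foldl_cons, List.filterMap_cons, stepA_eq_info]
    by_cases h : (bInfoOf p).lead = (bInfoOf p).n
    · simp only [h, ne_eq, not_true_eq_false, if_false, ite_true]
      exact ih _ _ _ _
    · simp only [ne_eq, h, not_false_eq_true, ite_true, ite_false]
      exact ih _ _ _ _

theorem pv_ports_eq (words : List String) :
    categorize_words words = categorize_words_alt words := by
  simp only [categorize_words, categorize_words_alt, bGroup, foldA_staged]

-- ===== VERDICT (by name: the statement is the Claim_ definition above) =====
theorem categorize_words_spec : Claim_equal_categorize_words := by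
  intro words _ _
  unfold Spec_categorize_words
  exact pv_ports_eq words
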